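-- pv_equiv track=rewrite | github.com/DanAcoVaz/GestionCafeteria | bebidas.py | nuevaBebida
-- ===== SOURCE A (Python) =====
-- def nuevaBebida(s):
--     #Quitamos los espacios en blanco
--     s = s.replace(" ", "")
--
--     #Nos aseguramos que haya algo en el string
--     if(len(s) <= 0):
--         return (False)
--
--     #Nos aseguramos de que haya , en el string
--     if(s.count(',') <= 0):
--         return(False)
--
--     #Nos aseguramos que el string no acabe en ,
--     if(s[-1] == ','):
--         return(False)
--
--     #Nos aseguramos que el nombre sea mayor a 2 caracteres
--     if(len(s[0:s.find(',')]) < 2):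
--         return(False)
--
--     #Nos aseguramos que el nombre sea menor a 15 caracteres
--     if(len(s[0:s.find(',')]) > 15):
--         return(False)
--
--     #Nos aseguramos que el nombre sea completamente alfabetico
--     if(s[0:s.find(',')].isalpha() == False):
--         return(False)
--
--     #contamos cuantas , hay en el string
--     commaCount = s.count(',')
--
--     #Checamos que haya hasta un maximo de 5 tamaños
--     if(commaCount > 5):
--         return(False)
--
--     #Variable para saber cual fue el ultimo size ingresado (para saber que se agregue en orden ascendente)
--     lastSize = 0
--     #Creamos un index para saber en donde estamos en el string
--     index = s.find(',')
--
--     #Un ciclo para checar los tamaños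
--     for i in range(commaCount):
--         #Checamos si este es el ultimo tamaño
--         if(commaCount == (i + 1)):
--             #Checamos si el numero es entero
--             if(s[index + 1:].isdigit() != True):
--                 return(False)
--
--             number = int(s[index + 1:])
--             #Checamos si el tamaño esta dentro del rango
--             if(number < 1 or number > 48):
--                 return(False)
--             #Checamos si este nuevo valor es mayor que el anterior
--             if(number < lastSize):
--                 return(False)
--         else:
--             #Checamos si el numero es entero
--             if(s[index + 1: s.find(',', index + 1)].isdigit() != True):
--                 return(False)
--
--             number = int(s[index + 1: s.find(',', index + 1)])
--             #Checamos si el tamaño esta dentro del rango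
--             if(number < 1 or number > 48):
--                 return(False)
--             #Checamos si este nuevo valor es mayor que el anterior
--             if(number < lastSize):
--                 return(False)
--             #Actualizamos el ultimo size agregado
--             lastSize = number
--             #Actualizamos el index
--             index = s.find(',', index + 1)
--
--     #Si llegamos aqui, es valida la entrada
--     return(True)
-- ===== SOURCE B (Python) =====
-- def nuevaBebida(s):
--     parts = s.replace(" ", "").split(',')
--     name, sizes = parts[0], parts[1:]
--     if not sizes or len(sizes) > 5:
--         return False
--     if len(name) < 2 or len(name) > 15 or not name.isalpha():
--         return False
--     last = 0
--     for p in sizes: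
--         if not p.isdigit():
--             return False
--         n = int(p)
--         if n < 1 or n > 48 or n < last:
--             return False
--         last = n
--     return True
-- ===== Notes on version B (the rewrite author's own statement) =====
-- stated objective: simpler
-- what changed: B splits the de-spaced string on the comma separator once and validates the resulting size list in one uniform pass, replacing A's find/index cursor arithmetic and its special-cased last element.
import Mathlib
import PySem

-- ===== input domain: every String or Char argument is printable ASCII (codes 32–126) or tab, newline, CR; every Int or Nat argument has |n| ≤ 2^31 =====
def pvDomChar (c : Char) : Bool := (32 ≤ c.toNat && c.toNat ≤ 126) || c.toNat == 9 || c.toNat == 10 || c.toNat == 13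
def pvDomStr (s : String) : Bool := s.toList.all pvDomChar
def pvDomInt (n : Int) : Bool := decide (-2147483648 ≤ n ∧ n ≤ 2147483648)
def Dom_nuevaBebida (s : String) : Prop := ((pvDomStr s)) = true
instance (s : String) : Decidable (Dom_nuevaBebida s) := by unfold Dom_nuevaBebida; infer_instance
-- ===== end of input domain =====

-- B validates the comma-split size list in one uniform pass instead of A's find/index
-- cursor loop with a special-cased last element; objective: simpler. Equivalence is proved
-- for every string (no precondition).

-- ===== PORT A =====
-- the 'for i in range(commaCount)' cursor loop of A, recursion on the remaining iterations
def nuevaBebidaLoopA (cs : List Char) (commaCount i : Nat) (lastSize index : Int) : Bool :=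
  if i < commaCount then
    if commaCount == i + 1 then
      -- last size: s[index+1:]
      let seg := PySem.List.slice cs (some (index + 1)) none
      if PySem.Chars.strIsdigit seg != true then false
      else
        -- int() cannot fail here (seg is a nonempty digit string), so getD 0 is exact
        let number := (PySem.Int.ofChars? seg).getD 0
        if number < 1 || number > 48 then false
        else if number < lastSize then false
        else nuevaBebidaLoopA cs commaCount (i + 1) lastSize index
    else
      let j := PySem.Chars.findFrom cs [','] (index + 1) none
      let seg := PySem.List.slice cs (some (index + 1)) (some j)
      if PySem.Chars.strIsdigit seg != true then false
      else
        let number := (PySem.Int.ofChars? seg).getD 0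
        if number < 1 || number > 48 then false
        else if number < lastSize then false
        else nuevaBebidaLoopA cs commaCount (i + 1) number j
  else true
termination_by commaCount - i

def nuevaBebida (s : String) : Bool :=
  let cs := PySem.Chars.replace s.toList [' '] []      -- s = s.replace(" ", "")
  if cs.length ≤ 0 then false
  else if PySem.Chars.count cs [','] ≤ 0 then false
  -- s[-1]: cs is nonempty here, so the IndexError branch is unreachable and getD is exact
  else if PySem.List.pyGetD cs (-1) ' ' == ',' then false
  else if (PySem.List.slice cs (some 0) (some (PySem.Chars.find cs [',']))).length < 2 then false
  else if (PySem.List.slice cs (some 0) (some (PySem.Chars.find cs [',']))).length > 15 then false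
  else if PySem.Chars.strIsalpha (PySem.List.slice cs (some 0) (some (PySem.Chars.find cs [',']))) == false then false
  else
    let commaCount := PySem.Chars.count cs [',']
    if commaCount > 5 then false
    else nuevaBebidaLoopA cs commaCount 0 0 (PySem.Chars.find cs [','])

-- ===== PORT B =====
-- the single uniform pass over the size pieces
def nuevaBebidaLoopB (sizes : List (List Char)) (last : Int) : Bool :=
  match sizes with
  | [] => true
  | p :: rest =>
    if !PySem.Chars.strIsdigit p then false
    else
      -- int() cannot fail here (p is a nonempty digit string), so getD 0 is exact
      let n := (PySem.Int.ofChars? p).getD 0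
      if n < 1 || n > 48 || n < last then false
      else nuevaBebidaLoopB rest n

def nuevaBebida_alt (s : String) : Bool :=
  let parts := PySem.Chars.splitOn (PySem.Chars.replace s.toList [' '] []) [',']
  match parts with
  | [] => false        -- unreachable: str.split never returns an empty list
  | name :: sizes =>
    if sizes.isEmpty || sizes.length > 5 then false
    else if name.length < 2 || name.length > 15 || !PySem.Chars.strIsalpha name then false
    else nuevaBebidaLoopB sizes 0

-- ===== PRECONDITION & SPEC =====
def Spec_nuevaBebida (s : String) (out : Bool) : Prop := out = nuevaBebida_alt s
instance (s : String) (out : Bool) : Decidable (Spec_nuevaBebida s out) := by unfold Spec_nuevaBebida; infer_instance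

-- ===== CLAIM (what is proved, stated in full; the proofs are below) =====
def Claim_equal_nuevaBebida : Prop := ∀ (s : String), Dom_nuevaBebida s → Spec_nuevaBebida s (nuevaBebida s)

-- ===== LEMMAS AND PROOFS =====

-- canonical structural recursion for splitting on a single comma
def mySplit (l : List Char) : List (List Char) :=
  match l with
  | [] => [[]]
  | c :: rest =>
    if c = ',' then [] :: mySplit rest
    else
      match mySplit rest with
      | [] => [[c]]
      | p :: ps => (c :: p) :: ps

theorem mySplit_ne_nil (l : List Char) : mySplit l ≠ [] := by
  cases l with
  | nil => simp [mySplit]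
  | cons c rest =>
    simp only [mySplit]
    split
    · simp
    · split <;> simp_all

theorem mySplit_cons_head (c : Char) (rest : List Char) (h : c ≠ ',') :
    ∃ p ps, mySplit rest = p :: ps ∧ mySplit (c :: rest) = (c :: p) :: ps := by
  cases hm : mySplit rest with
  | nil => exact absurd hm (mySplit_ne_nil rest)
  | cons p ps => exact ⟨p, ps, rfl, by simp [mySplit, h, hm]⟩

-- PySem's fuel/accumulator splitOn specializes, for a one-character separator, to mySplit
theorem splitOn_go_eq (l : List Char) : ∀ (fuel : Nat) (cur : List Char) (acc : List (List Char)),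
    l.length ≤ fuel →
    PySem.Chars.splitOn.go [','] fuel l cur acc =
      acc.reverse ++ (match mySplit l with
                      | [] => [cur.reverse]
                      | p :: ps => (cur.reverse ++ p) :: ps) := by
  induction l with
  | nil =>
    intro fuel cur acc _
    cases fuel <;> simp [PySem.Chars.splitOn.go, mySplit]
  | cons c rest ih =>
    intro fuel cur acc hf
    cases fuel with
    | zero => simp at hf
    | succ fuel =>
      by_cases hc : c = ','
      · subst hc
        have : ([','] : List Char).isPrefixOf (',' :: rest) = true := by simp [List.isPrefixOf]
        rw [PySem.Chars.splitOn.go] ; simp only [this, if_pos]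
        rw [show List.drop ([','] : List Char).length (',' :: rest) = rest from rfl]
        rw [ih fuel [] (cur.reverse :: acc) (by simpa using Nat.le_of_succ_le_succ hf)]
        cases hm : mySplit rest with
        | nil => exact absurd hm (mySplit_ne_nil rest)
        | cons p ps => simp [mySplit, hm]
      · have : ([','] : List Char).isPrefixOf (c :: rest) = false := by
          simp [List.isPrefixOf]; exact fun h => absurd h.symm hc
        rw [PySem.Chars.splitOn.go] ; simp only [this]
        rw [if_neg (by simp [this])]
        
        rw [ih fuel (c :: cur) acc (by simpa using Nat.le_of_succ_le_succ hf)]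
        obtain ⟨p, ps, hm, hm'⟩ := mySplit_cons_head c rest hc
        simp [hm, hm']

theorem splitOn_comma (l : List Char) : PySem.Chars.splitOn l [','] = mySplit l := by
  rw [PySem.Chars.splitOn]
  rw [splitOn_go_eq l (l.length + 1) [] [] (Nat.le_succ _)]
  cases hm : mySplit l with
  | nil => exact absurd hm (mySplit_ne_nil l)
  | cons p ps => simp

-- count of a one-character needle is List.count
theorem count_go_eq (l : List Char) : ∀ (fuel : Nat) (acc : Nat), l.length ≤ fuel →
    PySem.Chars.count.go [','] fuel l acc = acc + l.count ',' := by
  induction l with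
  | nil => intro fuel acc _; cases fuel <;> simp [PySem.Chars.count.go]
  | cons c rest ih =>
    intro fuel acc hf
    cases fuel with
    | zero => simp at hf
    | succ fuel =>
      by_cases hc : c = ','
      · subst hc
        have hp : ([','] : List Char).isPrefixOf (',' :: rest) = true := by simp [List.isPrefixOf]
        rw [PySem.Chars.count.go]; simp only [hp, if_pos]
        rw [show List.drop ([','] : List Char).length (',' :: rest) = rest from rfl]
        rw [ih fuel (acc + 1) (by simpa using Nat.le_of_succ_le_succ hf)]
        simp [List.count_cons]; omega
      · have hp : ([','] : List Char).isPrefixOf (c :: rest) = false := by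
          simp [List.isPrefixOf]; exact fun h => absurd h.symm hc
        rw [PySem.Chars.count.go]; simp only [hp]
        rw [if_neg (by simp [hp])]
        rw [ih fuel acc (by simpa using Nat.le_of_succ_le_succ hf)]
        simp [List.count_cons, hc]

theorem count_comma (l : List Char) : PySem.Chars.count l [','] = l.count ',' := by
  rw [PySem.Chars.count, if_neg (by simp)]
  rw [count_go_eq l l.length 0 (Nat.le_refl _)]; omega

theorem length_mySplit (l : List Char) : (mySplit l).length = l.count ',' + 1 := by
  induction l with
  | nil => simp [mySplit]
  | cons c rest ih =>
    by_cases hc : c = ','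
    · subst hc; simp [mySplit, List.count_cons, ih]
    · obtain ⟨p, ps, hm, hm'⟩ := mySplit_cons_head c rest hc
      rw [hm']
      simp only [List.length_cons, List.count_cons]
      rw [hm] at ih
      simp_all

theorem mySplit_no_comma (l : List Char) (h : ',' ∉ l) : mySplit l = [l] := by
  induction l with
  | nil => simp [mySplit]
  | cons c rest ih =>
    have hc : c ≠ ',' := fun hc => h (by simp [hc])
    obtain ⟨p, ps, hm, hm'⟩ := mySplit_cons_head c rest hc
    rw [ih (fun hr => h (List.mem_cons_of_mem _ hr))] at hm
    cases hm; simp [hm']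

theorem mySplit_split (p rest : List Char) (h : ',' ∉ p) :
    mySplit (p ++ ',' :: rest) = p :: mySplit rest := by
  induction p with
  | nil => simp [mySplit]
  | cons c p ih =>
    have hc : c ≠ ',' := fun hc => h (by simp [hc])
    have ih' := ih (fun hr => h (List.mem_cons_of_mem _ hr))
    obtain ⟨q, qs, hm, hm'⟩ := mySplit_cons_head c (p ++ ',' :: rest) hc
    rw [ih'] at hm
    cases hm
    simpa using hm'

theorem getLast?_cons_ne_nil {α : Type} (a : α) (l : List α) (h : l ≠ []) :
    (a :: l).getLast? = l.getLast? := by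
  cases l with
  | nil => exact absurd rfl h
  | cons b t => exact List.getLast?_cons_cons

-- if the string ends in a comma, the last split piece is empty
theorem mySplit_getLast_comma (l : List Char) :
    (mySplit (l ++ [','])).getLast? = some [] := by
  induction l with
  | nil => simp [mySplit]
  | cons c l ih =>
    by_cases hc : c = ','
    · subst hc
      rw [show ((',' :: l) ++ [','] : List Char) = ',' :: (l ++ [',']) from rfl]
      rw [show mySplit (',' :: (l ++ [','])) = [] :: mySplit (l ++ [',']) from by simp [mySplit]]
      rw [getLast?_cons_ne_nil _ _ (mySplit_ne_nil _)]
      exact ih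
    · obtain ⟨p, ps, hm, hm'⟩ := mySplit_cons_head c (l ++ [',']) hc
      rw [show (c :: l) ++ [','] = c :: (l ++ [',']) from rfl, hm']
      cases ps with
      | nil =>
        exfalso
        have hlen := length_mySplit (l ++ [','])
        rw [hm] at hlen
        simp [List.count_append] at hlen
      | cons q qs =>
        rw [getLast?_cons_ne_nil _ _ (by simp)]
        rw [hm] at ih
        rwa [getLast?_cons_ne_nil _ _ (by simp)] at ih

theorem loopB_false_of_nil_mem (sizes : List (List Char)) (last : Int)
    (h : [] ∈ sizes) : nuevaBebidaLoopB sizes last = false := by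
  induction sizes generalizing last with
  | nil => simp at h
  | cons p rest ih =>
    rw [nuevaBebidaLoopB]
    rcases List.mem_cons.mp h with h | h
    · cases h; simp [PySem.Chars.strIsdigit]
    · by_cases hd : (!PySem.Chars.strIsdigit p) = true
      · simp [hd]
      · simp only [Bool.not_eq_true] at hd
        simp only [hd, Bool.false_eq_true, if_false]
        by_cases hn : ((decide ((PySem.Int.ofChars? p).getD 0 < 1) || decide ((PySem.Int.ofChars? p).getD 0 > 48) || decide ((PySem.Int.ofChars? p).getD 0 < last)) = true)
        · simp [hn]
        · simp only [hn]
          simpa using ih _ h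

-- the first comma of p ++ ',' :: rest (no comma in p) sits at index p.length
theorem find_comma_eq (p rest : List Char) (h : ',' ∉ p) :
    PySem.Chars.find (p ++ ',' :: rest) [','] = (p.length : Int) := by
  set l := p ++ ',' :: rest with hl
  have hmem : (',' : Char) ∈ l := by simp [hl]
  have hnn : 0 ≤ PySem.Chars.find l [','] := by
    rw [PySem.Chars.find_nonneg_iff]
    exact ⟨p, rest, by simp [hl]⟩
  obtain ⟨hpref, hmin⟩ := PySem.Chars.find_spec (s := l) (sub := [',']) hnn
  set k := (PySem.Chars.find l [',']).toNat with hk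
  -- k ≤ p.length since p.length is an occurrence
  have hocc : ([','] : List Char) <+: l.drop p.length := by
    simp [hl, List.drop_append]
  have hle : k ≤ p.length := by
    by_contra hgt
    exact hmin p.length (by omega) hocc
  -- k < p.length impossible: l[k] would be a comma inside p
  have heq : k = p.length := by
    by_contra hne
    have hklt : k < p.length := by omega
    obtain ⟨t, ht⟩ := hpref
    have : l[k]? = some ',' := by
      have : (l.drop k) = ',' :: t := ht ▸ rfl
      have h0 : (l.drop k)[0]? = some ',' := by rw [this]; rfl
      rwa [List.getElem?_drop, Nat.add_zero] at h0
    have hpk : l[k]? = p[k]? := by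
      rw [hl, List.getElem?_append_left hklt]
    rw [hpk] at this
    exact h (List.mem_of_getElem? this)
  omega

-- first-comma decomposition of a list containing a comma
theorem exists_first_comma (l : List Char) (h : (',' : Char) ∈ l) :
    ∃ p t, l = p ++ ',' :: t ∧ (',' : Char) ∉ p := by
  induction l with
  | nil => simp at h
  | cons c rest ih =>
    by_cases hc : c = ','
    · exact ⟨[], rest, by simp [hc], by simp⟩
    · obtain ⟨p, t, hpt, hnp⟩ := ih (by rcases List.mem_cons.mp h with h | h; exact absurd h.symm hc; exact h)
      exact ⟨c :: p, t, by simp [hpt], by simp [hnp]; exact fun h => hc h.symm⟩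

-- the main loop equivalence: A's cursor loop over cs = pre ++ ',' :: suffix computes
-- B's uniform pass over the pieces of suffix
theorem loopA_stop (cs : List Char) (cc i : Nat) (last idx : Int) (h : ¬ i < cc) :
    nuevaBebidaLoopA cs cc i last idx = true := by
  rw [nuevaBebidaLoopA, if_neg h]

theorem drop_after_comma (pre suffix : List Char) :
    (pre ++ ',' :: suffix).drop (pre.length + 1) = suffix := by
  rw [show pre ++ ',' :: suffix = (pre ++ [',']) ++ suffix from by simp]
  rw [show pre.length + 1 = (pre ++ [',']).length from by simp]
  exact List.drop_left

-- the last loop iteration of A (no comma left in the suffix) is B's pass over the one piece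
theorem loop_last (suffix pre : List Char) (i : Nat) (last : Int)
    (h0 : suffix.count ',' = 0) :
    nuevaBebidaLoopA (pre ++ ',' :: suffix) (i + 1 + suffix.count ',') i last (pre.length : Int)
      = nuevaBebidaLoopB (mySplit suffix) last := by
  have hns : (',' : Char) ∉ suffix := List.count_eq_zero.mp h0
  rw [mySplit_no_comma suffix hns]
  rw [nuevaBebidaLoopA, if_pos (by omega)]
  rw [if_pos (by simp [h0])]
  have hcast : (pre.length : Int) + 1 = ((pre.length + 1 : Nat) : Int) := by push_cast; ring
  have hseg : PySem.List.slice (pre ++ ',' :: suffix) (some ((pre.length : Int) + 1)) none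
      = suffix := by
    rw [hcast, PySem.List.slice_from_natCast, drop_after_comma]
  simp only [hseg]
  rw [loopA_stop _ _ _ _ _ (by omega)]
  cases hd : PySem.Chars.strIsdigit suffix
  · simp [hd, nuevaBebidaLoopB]
  · simp only [hd, nuevaBebidaLoopB]
    by_cases h1 : ((PySem.Int.ofChars? suffix).getD 0 < 1)
    · simp [h1]
    · by_cases h2 : ((PySem.Int.ofChars? suffix).getD 0 > 48)
      · simp [h1, h2]
      · by_cases h3 : ((PySem.Int.ofChars? suffix).getD 0 < last)
        · simp [h1, h2, h3]
        · simp [h1, h2, h3, nuevaBebidaLoopB]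

theorem loop_equiv : ∀ (N : Nat) (suffix : List Char), suffix.length ≤ N →
    ∀ (pre : List Char) (i : Nat) (last : Int),
    nuevaBebidaLoopA (pre ++ ',' :: suffix) (i + 1 + suffix.count ',') i last (pre.length : Int)
      = nuevaBebidaLoopB (mySplit suffix) last := by
  intro N
  induction N with
  | zero =>
    intro suffix hlen pre i last
    have : suffix = [] := List.length_eq_zero_iff.mp (Nat.le_zero.mp hlen)
    subst this
    exact loop_last [] pre i last rfl
  | succ N IH =>
    intro suffix hlen pre i last
    by_cases h0 : suffix.count ',' = 0
    · exact loop_last suffix pre i last h0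
    · have hmem : (',' : Char) ∈ suffix := by
        by_contra hm
        exact h0 (List.count_eq_zero.mpr hm)
      obtain ⟨p, t, hpt, hnp⟩ := exists_first_comma suffix hmem
      have hpc : p.count ',' = 0 := List.count_eq_zero.mpr hnp
      have hsc : suffix.count ',' = t.count ',' + 1 := by
        rw [hpt]; simp [List.count_append, List.count_cons, hpc]
      rw [nuevaBebidaLoopA, if_pos (by omega)]
      rw [if_neg (by simp; omega)]
      have hcast : (pre.length : Int) + 1 = ((pre.length + 1 : Nat) : Int) := by push_cast; ring
      have hk : pre.length + 1 ≤ (pre ++ ',' :: suffix).length := by simp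
      have hfind : PySem.Chars.findFrom (pre ++ ',' :: suffix) [','] ((pre.length : Int) + 1) none
          = (pre.length : Int) + 1 + (p.length : Int) := by
        rw [hcast, PySem.Chars.findFrom_natCast _ _ _ hk, drop_after_comma, hpt,
            find_comma_eq p t hnp]
        rw [if_neg (by omega)]
      simp only [hfind]
      have hseg : PySem.List.slice (pre ++ ',' :: suffix)
          (some ((pre.length : Int) + 1))
          (some ((pre.length : Int) + 1 + (p.length : Int))) = p := by
        rw [hcast, PySem.List.slice_natCast_add, drop_after_comma, hpt]
        exact List.take_left
      simp only [hseg]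
      rw [hpt, mySplit_split p t hnp]
      simp only [nuevaBebidaLoopB]
      cases hd : PySem.Chars.strIsdigit p
      · simp
      · by_cases h1 : ((PySem.Int.ofChars? p).getD 0 < 1)
        · simp [h1]
        · by_cases h2 : ((PySem.Int.ofChars? p).getD 0 > 48)
          · simp [h1, h2]
          · by_cases h3 : ((PySem.Int.ofChars? p).getD 0 < last)
            · simp [h1, h2, h3]
            · have hcs : pre ++ ',' :: (p ++ ',' :: t) = (pre ++ ',' :: p) ++ ',' :: t := by
                simp
              have hcc : i + 1 + (p ++ ',' :: t).count ',' = (i + 1) + 1 + t.count ',' := by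
                rw [← hpt]; omega
              have hj : (pre.length : Int) + 1 + (p.length : Int)
                  = ((pre ++ ',' :: p).length : Int) := by
                push_cast [List.length_append, List.length_cons]; ring
              have hlt : t.length ≤ N := by
                have hsl : suffix.length = p.length + 1 + t.length := by
                  rw [hpt]; simp; omega
                omega
              have hIH := IH t hlt (pre ++ ',' :: p) (i + 1) ((PySem.Int.ofChars? p).getD 0)
              rw [hcs, hcc, hj, hIH]
              simp [h1, h2, h3]

theorem pyGetD_neg_one_getLast (l : List Char) (d : Char) (h : l ≠ []) :
    PySem.List.pyGetD l (-1) d = l.getLast h := by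
  have h1 : 1 ≤ l.length := List.length_pos_of_ne_nil h
  rw [PySem.List.pyGetD_neg_ofNat l 1 d (by omega) (by omega)]
  rw [List.getLast_eq_getElem]

-- ===== VERDICT (by name: the statement is the Claim_ definition above) =====
theorem nuevaBebida_spec : Claim_equal_nuevaBebida := by
  intro s _
  unfold Spec_nuevaBebida
  show nuevaBebida s = nuevaBebida_alt s
  rw [nuevaBebida, nuevaBebida_alt]
  simp only [splitOn_comma, count_comma]
  generalize PySem.Chars.replace s.toList [' '] [] = cs
  by_cases hnil : cs = []
  · subst hnil
    simp [mySplit]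
  · rw [if_neg (by simp [List.length_pos_of_ne_nil hnil]; omega)]
    by_cases hcnt : cs.count ',' = 0
    · rw [if_pos (by omega)]
      rw [mySplit_no_comma cs (List.count_eq_zero.mp hcnt)]
      simp
    · rw [if_neg (by omega)]
      have hmem : (',' : Char) ∈ cs := by
        by_contra hm; exact hcnt (List.count_eq_zero.mpr hm)
      by_cases hlast : cs.getLast hnil = ','
      · -- the string ends in a comma: A rejects it up front, B's pass hits the empty piece
        rw [if_pos (by rw [pyGetD_neg_one_getLast cs ' ' hnil, hlast]; rfl)]
        obtain ⟨l', hl'⟩ : ∃ l', cs = l' ++ [','] :=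
          ⟨cs.dropLast, by conv_lhs => rw [← List.dropLast_append_getLast hnil, hlast]⟩
        have hlcomma := mySplit_getLast_comma l'
        rw [← hl'] at hlcomma
        cases hm : mySplit cs with
        | nil => exact absurd hm (mySplit_ne_nil cs)
        | cons name sizes =>
          have hlen2 : sizes.length = cs.count ',' := by
            have := length_mySplit cs
            rw [hm] at this
            simp at this
            omega
          have hsne : sizes ≠ [] := by
            intro h; rw [h] at hlen2; simp at hlen2; omega
          have hnilmem : ([] : List Char) ∈ sizes := by
            rw [hm, getLast?_cons_ne_nil _ _ hsne] at hlcomma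
            exact List.mem_of_getLast? hlcomma
          have hne : sizes.isEmpty = false := by
            cases sizes with
            | nil => exact absurd rfl hsne
            | cons a t => rfl
          have hB := loopB_false_of_nil_mem sizes 0 hnilmem
          simp [hne, hB]
      · -- last character is not a comma: both sides validate the same pieces
        rw [if_neg (by rw [pyGetD_neg_one_getLast cs ' ' hnil]; simp [hlast])]
        obtain ⟨name, suffix, hns, hnp⟩ := exists_first_comma cs hmem
        rw [hns, find_comma_eq name suffix hnp, mySplit_split name suffix hnp]
        have hslice : PySem.List.slice (name ++ ',' :: suffix) (some 0) (some (name.length : Int))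
            = name := by
          rw [PySem.List.slice_zero_start, PySem.List.slice_to_natCast]
          exact List.take_left
        rw [hslice]
        have hcc : (name ++ ',' :: suffix).count ',' = 1 + suffix.count ',' := by
          have := List.count_eq_zero.mpr hnp
          simp [List.count_append, this]
          omega
        have hsz : (mySplit suffix).length = suffix.count ',' + 1 := length_mySplit suffix
        have hne : (mySplit suffix).isEmpty = false := by
          cases h : mySplit suffix with
          | nil => exact absurd h (mySplit_ne_nil suffix)
          | cons a t => rfl
        rw [hcc]
        by_cases h2 : name.length < 2
        · simp [h2]
        · by_cases h15 : name.length > 15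
          · simp [h2, h15]
          · by_cases halpha : PySem.Chars.strIsalpha name = true
            · by_cases h5 : 1 + suffix.count ',' > 5
              · have h5' : (mySplit suffix).length > 5 := by rw [hsz]; omega
                simp [h2, h15, halpha, h5, h5', hne]
              · have h5' : ¬ (mySplit suffix).length > 5 := by rw [hsz]; omega
                have hloop := loop_equiv suffix.length suffix le_rfl name 0 0
                simp only [Nat.zero_add] at hloop
                simp [h2, h15, halpha, h5, h5', hne, hloop]
            · simp only [Bool.not_eq_true] at halpha
              simp [h2, h15, halpha, hne]
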